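-- pv_equiv track=rewrite | github.com/scottjones03/QEC-Lib | src/qectostim/experiments/hardware_simulation/trapped_ion/routing/data_structures.py | compute_target_positions
-- ===== SOURCE A (Python) =====
-- from typing import Dict, List, Set, Tuple
--
-- def compute_target_positions(
--     pairs: List[Tuple[int, int]],
--     n_rows: int,
--     n_cols: int,
--     capacity: int = 2,
-- ) -> Dict[int, Tuple[int, int]]:
--     """Compute target positions for ions to satisfy gate pairs.
--
--     Uses bipartite matching to assign ions to gating positions.
--
--     Parameters
--     ----------
--     pairs : List[Tuple[int, int]]
--         Ion pairs that need to interact.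
--     n_rows : int
--         Grid rows.
--     n_cols : int
--         Grid columns.
--     capacity : int
--         Block width for gating zones.
--
--     Returns
--     -------
--     Dict[int, Tuple[int, int]]
--         Target position for each ion involved in gates.
--     """
--     targets: Dict[int, Tuple[int, int]] = {}
--
--     # Collect all ions involved
--     all_ions: Set[int] = set()
--     for a, b in pairs:
--         all_ions.add(a)
--         all_ions.add(b)
--
--     # Available gating positions (pairs of adjacent cells)
--     gating_positions: List[Tuple[Tuple[int, int], Tuple[int, int]]] = []
--     for r in range(n_rows):
--         for c in range(0, n_cols - 1, capacity):
--             gating_positions.append(((r, c), (r, c + 1)))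
--
--     # Simple greedy assignment
--     used_positions: Set[Tuple[int, int]] = set()
--
--     for ion_a, ion_b in pairs:
--         if ion_a in targets and ion_b in targets:
--             continue
--
--         # Find an unused gating position
--         for pos_a, pos_b in gating_positions:
--             if pos_a not in used_positions and pos_b not in used_positions:
--                 if ion_a not in targets:
--                     targets[ion_a] = pos_a
--                     used_positions.add(pos_a)
--                 if ion_b not in targets:
--                     targets[ion_b] = pos_b
--                     used_positions.add(pos_b)
--                 break
--
--     return targets
-- ===== SOURCE B (Python) =====
-- def compute_target_positions(pairs, n_rows, n_cols, capacity=2):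
--     """Greedy assignment with a monotone frontier pointer over gating positions.
--
--     Positions earlier than the frontier are permanently blocked (once a cell is
--     used it stays used, and every picked position acquires a used cell), so the
--     scan never needs to restart from index 0.
--     """
--     targets = {}
--     gating = [((r, c), (r, c + 1))
--               for r in range(n_rows)
--               for c in range(0, n_cols - 1, capacity)]
--     used = set()
--     idx = 0
--     n = len(gating)
--     for ion_a, ion_b in pairs:
--         if ion_a in targets and ion_b in targets:
--             continue
--         while idx < n and (gating[idx][0] in used or gating[idx][1] in used):
--             idx += 1
--         if idx == n:
--             continue
--         pos_a, pos_b = gating[idx]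
--         if ion_a not in targets:
--             targets[ion_a] = pos_a
--             used.add(pos_a)
--         if ion_b not in targets:
--             targets[ion_b] = pos_b
--             used.add(pos_b)
--     return targets
-- ===== Notes on version B (the rewrite author's own statement) =====
-- stated objective: alternative
-- what changed: Instead of rescanning the whole gating-position list from index 0 for every pair, B advances a monotone frontier pointer over the positions (positions left behind are provably blocked forever) and rechecks only from that frontier.
import Mathlib
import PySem

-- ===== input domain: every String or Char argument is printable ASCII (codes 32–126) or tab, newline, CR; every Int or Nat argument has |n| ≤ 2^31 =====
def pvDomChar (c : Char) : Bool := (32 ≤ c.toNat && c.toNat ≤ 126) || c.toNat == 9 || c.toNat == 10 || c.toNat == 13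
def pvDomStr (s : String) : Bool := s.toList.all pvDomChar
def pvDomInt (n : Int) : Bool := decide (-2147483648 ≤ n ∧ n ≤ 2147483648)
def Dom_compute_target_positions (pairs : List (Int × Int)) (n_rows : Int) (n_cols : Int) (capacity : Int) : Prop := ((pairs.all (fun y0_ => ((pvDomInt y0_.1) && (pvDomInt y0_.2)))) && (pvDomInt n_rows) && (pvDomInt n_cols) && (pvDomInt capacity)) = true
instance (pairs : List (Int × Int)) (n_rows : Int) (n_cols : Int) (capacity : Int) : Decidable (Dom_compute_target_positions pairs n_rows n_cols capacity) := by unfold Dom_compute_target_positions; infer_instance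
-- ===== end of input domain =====

-- ===== PORT A =====
-- B is a monotone-frontier rewrite of A's greedy assignment: it never rescans the
-- gating-position list from index 0 (objective: alternative scan strategy, same results).
-- Helpers shared by both ports because the corresponding Python lines are identical:
-- the gating-position list (range(n_rows) × range(0, n_cols-1, capacity)) …
def pvGating (n_rows n_cols capacity : Int) : List ((Int × Int) × (Int × Int)) :=
  (PySem.List.pyRange 0 n_rows 1).flatMap (fun r =>
    (PySem.List.pyRange 0 (n_cols - 1) capacity).map (fun c => ((r, c), (r, c + 1))))

-- … and the two `if ion not in targets: targets[ion] = pos; used.add(pos)` blocks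
def pvAssignSnd (st : PySem.Dict Int (Int × Int) × PySem.Set (Int × Int)) (b : Int)
    (q : Int × Int) : PySem.Dict Int (Int × Int) × PySem.Set (Int × Int) :=
  if st.1.contains b then st else (st.1.insert b q, st.2.add q)

def pvAssign (targets : PySem.Dict Int (Int × Int)) (used : PySem.Set (Int × Int))
    (a b : Int) (p q : Int × Int) : PySem.Dict Int (Int × Int) × PySem.Set (Int × Int) :=
  pvAssignSnd (if targets.contains a then (targets, used) else (targets.insert a p, used.add p)) b q

-- one iteration of A's `for ion_a, ion_b in pairs` loop: rescan `gating` from the start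
def pvStepA (gating : List ((Int × Int) × (Int × Int)))
    (st : PySem.Dict Int (Int × Int) × PySem.Set (Int × Int)) (pr : Int × Int) :
    PySem.Dict Int (Int × Int) × PySem.Set (Int × Int) :=
  if st.1.contains pr.1 && st.1.contains pr.2 then st
  else
    match gating.find? (fun pq => !(st.2.contains pq.1) && !(st.2.contains pq.2)) with
    | none => st
    | some (p, q) => pvAssign st.1 st.2 pr.1 pr.2 p q

def compute_target_positions (pairs : List (Int × Int)) (n_rows : Int) (n_cols : Int) (capacity : Int) : List (Int × Int × Int) :=
  -- `all_ions` in A is computed and never read; it cannot affect the returned dict, so it is not ported.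
  let gating := pvGating n_rows n_cols capacity
  let st := pairs.foldl (pvStepA gating) (PySem.Dict.empty, PySem.Set.empty)
  st.1.items

-- ===== PORT B =====
-- the `while idx < n and (... in used or ... in used): idx += 1` loop of Source B,
-- with the pointer represented as the remaining suffix gating[idx:]
def pvSkip (used : PySem.Set (Int × Int)) :
    List ((Int × Int) × (Int × Int)) → List ((Int × Int) × (Int × Int))
  | [] => []
  | pq :: rest =>
    if used.contains pq.1 || used.contains pq.2 then pvSkip used rest else pq :: rest

-- one iteration of Source B's main loop; the state also carries the frontier suffix
def pvStepB
    (st : PySem.Dict Int (Int × Int) × PySem.Set (Int × Int) × List ((Int × Int) × (Int × Int)))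
    (pr : Int × Int) :
    PySem.Dict Int (Int × Int) × PySem.Set (Int × Int) × List ((Int × Int) × (Int × Int)) :=
  if st.1.contains pr.1 && st.1.contains pr.2 then st
  else
    match pvSkip st.2.1 st.2.2 with
    | [] => (st.1, st.2.1, [])
    | (p, q) :: tail =>
      ((pvAssign st.1 st.2.1 pr.1 pr.2 p q).1, (pvAssign st.1 st.2.1 pr.1 pr.2 p q).2,
        (p, q) :: tail)

def compute_target_positions_alt (pairs : List (Int × Int)) (n_rows : Int) (n_cols : Int) (capacity : Int) : List (Int × Int × Int) :=
  let gating := pvGating n_rows n_cols capacity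
  let st := pairs.foldl pvStepB (PySem.Dict.empty, PySem.Set.empty, gating)
  st.1.items

-- ===== PRECONDITION & SPEC =====
-- Pre_ excludes exactly the inputs where A raises: capacity == 0 with n_rows >= 1
-- makes A's `range(0, n_cols - 1, 0)` raise ValueError (B raises identically there).
def Pre_compute_target_positions (pairs : List (Int × Int)) (n_rows : Int) (n_cols : Int) (capacity : Int) : Prop :=
  capacity ≠ 0 ∨ n_rows ≤ 0
instance (pairs : List (Int × Int)) (n_rows : Int) (n_cols : Int) (capacity : Int) : Decidable (Pre_compute_target_positions pairs n_rows n_cols capacity) := by unfold Pre_compute_target_positions; infer_instance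
def pvWitness_compute_target_positions : (List (Int × Int)) × Int × Int × Int := ([(1, 2), (3, 4)], 2, 4, 2)

def Spec_compute_target_positions (pairs : List (Int × Int)) (n_rows : Int) (n_cols : Int) (capacity : Int) (out : List (Int × Int × Int)) : Prop := out = compute_target_positions_alt pairs n_rows n_cols capacity
instance (pairs : List (Int × Int)) (n_rows : Int) (n_cols : Int) (capacity : Int) (out : List (Int × Int × Int)) : Decidable (Spec_compute_target_positions pairs n_rows n_cols capacity out) := by unfold Spec_compute_target_positions; infer_instance

-- ===== CLAIM (what is proved, stated in full; the proofs are below) =====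
def Claim_equal_compute_target_positions : Prop := ∀ (pairs : List (Int × Int)) (n_rows : Int) (n_cols : Int) (capacity : Int), Dom_compute_target_positions pairs n_rows n_cols capacity → Pre_compute_target_positions pairs n_rows n_cols capacity → Spec_compute_target_positions pairs n_rows n_cols capacity (compute_target_positions pairs n_rows n_cols capacity)

-- ===== LEMMAS AND PROOFS =====

-- a gating position is "blocked" in `used` when one of its cells is used
def pvBlocked (used : PySem.Set (Int × Int)) (pq : (Int × Int) × (Int × Int)) : Prop :=
  pq.1 ∈ used ∨ pq.2 ∈ used

-- `Set.add` only grows the set, so blockedness is monotone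
theorem pvMem_add (u : PySem.Set (Int × Int)) (x y : Int × Int) (h : x ∈ u) : x ∈ u.add y := by
  unfold PySem.Set.add
  split
  · exact h
  · exact List.mem_append_left _ h

theorem pvBlocked_add (u : PySem.Set (Int × Int)) (pq : (Int × Int) × (Int × Int)) (y : Int × Int)
    (h : pvBlocked u pq) : pvBlocked (u.add y) pq := by
  rcases h with h | h
  · exact Or.inl (pvMem_add u pq.1 y h)
  · exact Or.inr (pvMem_add u pq.2 y h)

-- blockedness is preserved by the assignment phase (which only adds to `used`)
theorem pvAssignSnd_mono (st : PySem.Dict Int (Int × Int) × PySem.Set (Int × Int)) (b : Int)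
    (q : Int × Int) (x : (Int × Int) × (Int × Int)) (h : pvBlocked st.2 x) :
    pvBlocked (pvAssignSnd st b q).2 x := by
  unfold pvAssignSnd
  split
  · exact h
  · exact pvBlocked_add st.2 x q h

theorem pvAssign_mono (t : PySem.Dict Int (Int × Int)) (u : PySem.Set (Int × Int))
    (a b : Int) (p q : Int × Int) (x : (Int × Int) × (Int × Int))
    (h : pvBlocked u x) : pvBlocked (pvAssign t u a b p q).2 x := by
  unfold pvAssign
  apply pvAssignSnd_mono
  split
  · exact h
  · exact pvBlocked_add u x p h

-- pvSkip drops a blocked prefix …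
theorem pvSkip_prefix (u : PySem.Set (Int × Int)) (rest : List ((Int × Int) × (Int × Int))) :
    ∃ pre, rest = pre ++ pvSkip u rest ∧ ∀ pq ∈ pre, pvBlocked u pq := by
  induction rest with
  | nil => exact ⟨[], rfl, by simp⟩
  | cons hd tl ih =>
    by_cases hb : pvBlocked u hd
    · obtain ⟨pre, heq, hall⟩ := ih
      refine ⟨hd :: pre, ?_, ?_⟩
      · simp only [pvSkip]
        rw [if_pos (by simpa [pvBlocked] using hb), List.cons_append, ← heq]
      · intro pq hpq
        rcases List.mem_cons.mp hpq with rfl | hm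
        · exact hb
        · exact hall pq hm
    · refine ⟨[], ?_, by simp⟩
      simp only [pvSkip]
      rw [if_neg (by simpa [pvBlocked] using hb), List.nil_append]

-- … and A's rescan-from-zero `find?` equals the head of pvSkip
theorem pvSkip_find (u : PySem.Set (Int × Int)) (rest : List ((Int × Int) × (Int × Int))) :
    rest.find? (fun pq => !(u.contains pq.1) && !(u.contains pq.2)) = (pvSkip u rest).head? := by
  induction rest with
  | nil => rfl
  | cons hd tl ih =>
    rw [List.find?_cons]
    by_cases hb : pvBlocked u hd
    · have hpred : (!(u.contains hd.1) && !(u.contains hd.2)) = false := by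
        rcases hb with h | h <;> simp [h]
      rw [hpred]
      simp only [pvSkip]
      rw [if_pos (by simpa [pvBlocked] using hb)]
      exact ih
    · have hpred : (!(u.contains hd.1) && !(u.contains hd.2)) = true := by
        simpa [pvBlocked, not_or] using hb
      rw [hpred]
      simp only [pvSkip]
      rw [if_neg (by simpa [pvBlocked] using hb), List.head?_cons]

-- find? over a blocked prefix passes through
theorem pvFind_append (u : PySem.Set (Int × Int)) (pre rest : List ((Int × Int) × (Int × Int)))
    (hall : ∀ pq ∈ pre, pvBlocked u pq) :
    (pre ++ rest).find? (fun pq => !(u.contains pq.1) && !(u.contains pq.2)) =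
      rest.find? (fun pq => !(u.contains pq.1) && !(u.contains pq.2)) := by
  induction pre with
  | nil => rfl
  | cons hd tl ih =>
    have hpred : (!(u.contains hd.1) && !(u.contains hd.2)) = false := by
      rcases hall hd (List.mem_cons_self ..) with h | h <;> simp [h]
    rw [List.cons_append, List.find?_cons, hpred]
    exact ih (fun pq hm => hall pq (List.mem_cons_of_mem _ hm))

-- the coupling invariant: same targets, same used set, and B's frontier suffix is
-- gating minus a permanently blocked prefix
def pvInv (gating : List ((Int × Int) × (Int × Int)))
    (sA : PySem.Dict Int (Int × Int) × PySem.Set (Int × Int))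
    (sB : PySem.Dict Int (Int × Int) × PySem.Set (Int × Int) × List ((Int × Int) × (Int × Int))) :
    Prop :=
  sA.1 = sB.1 ∧ sA.2 = sB.2.1 ∧
    ∃ pre, gating = pre ++ sB.2.2 ∧ ∀ pq ∈ pre, pvBlocked sA.2 pq

-- one loop iteration preserves the invariant
theorem pvStep_inv (gating : List ((Int × Int) × (Int × Int)))
    (sA : PySem.Dict Int (Int × Int) × PySem.Set (Int × Int))
    (sB : PySem.Dict Int (Int × Int) × PySem.Set (Int × Int) × List ((Int × Int) × (Int × Int)))
    (pr : Int × Int) (h : pvInv gating sA sB) :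
    pvInv gating (pvStepA gating sA pr) (pvStepB sB pr) := by
  obtain ⟨tA, uA⟩ := sA
  obtain ⟨tB, uB, rest⟩ := sB
  obtain ⟨ht, hu, pre, hg, hall⟩ := h
  dsimp only at ht hu hg hall
  subst ht; subst hu
  unfold pvStepA pvStepB
  dsimp only
  by_cases hboth : (tA.contains pr.1 && tA.contains pr.2) = true
  · rw [if_pos hboth, if_pos hboth]
    exact ⟨rfl, rfl, pre, hg, hall⟩
  · rw [if_neg hboth, if_neg hboth]
    have hfind : gating.find? (fun pq => !(uA.contains pq.1) && !(uA.contains pq.2)) =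
        (pvSkip uA rest).head? := by
      rw [hg, pvFind_append uA pre rest hall, pvSkip_find]
    obtain ⟨pre2, heq2, hall2⟩ := pvSkip_prefix uA rest
    have hpre' : ∀ x ∈ pre ++ pre2, pvBlocked uA x := by
      intro x hm
      rcases List.mem_append.mp hm with hm | hm
      · exact hall x hm
      · exact hall2 x hm
    cases hskip : pvSkip uA rest with
    | nil =>
      rw [hfind, hskip]
      exact ⟨rfl, rfl, pre ++ pre2, by rw [hg, heq2, hskip]; simp, hpre'⟩
    | cons pq tail =>
      obtain ⟨p, q⟩ := pq
      rw [hfind, hskip]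
      dsimp only [List.head?_cons]
      refine ⟨rfl, rfl, pre ++ pre2, by rw [hg, heq2, hskip]; simp, ?_⟩
      exact fun x hm => pvAssign_mono tA uA pr.1 pr.2 p q x (hpre' x hm)

theorem pvFoldl_inv (gating : List ((Int × Int) × (Int × Int))) (pairs : List (Int × Int))
    (sA : PySem.Dict Int (Int × Int) × PySem.Set (Int × Int))
    (sB : PySem.Dict Int (Int × Int) × PySem.Set (Int × Int) × List ((Int × Int) × (Int × Int)))
    (h : pvInv gating sA sB) :
    pvInv gating (pairs.foldl (pvStepA gating) sA) (pairs.foldl pvStepB sB) := by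
  induction pairs generalizing sA sB with
  | nil => exact h
  | cons hd tl ih => exact ih _ _ (pvStep_inv gating sA sB hd h)

-- ===== VERDICT (by name: the statement is the Claim_ definition above) =====
theorem compute_target_positions_spec : Claim_equal_compute_target_positions := by
  intro pairs n_rows n_cols capacity _ _
  have h := pvFoldl_inv (pvGating n_rows n_cols capacity) pairs
    (PySem.Dict.empty, PySem.Set.empty)
    (PySem.Dict.empty, PySem.Set.empty, pvGating n_rows n_cols capacity)
    ⟨rfl, rfl, [], rfl, by simp⟩
  exact congrArg PySem.Dict.items h.1
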